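-- pv_equiv track=rewrite | github.com/DTaa2105ta/CMU-15-112 | week 8/hw8.py | isPreSquareNumber
-- ===== SOURCE A (Python) =====
-- def isPreSquareNumber(n):
--     # takes a possibly-negative integer n and returns bool
--     n = abs(n)
--     def getLength(num):
--         length = 1
--         while num >= 10:
--             length += 1
--             num //= 10
--         return length
--
--     l = getLength(n) - 1
--     def isPreSN_tail(n, l):
--         tdiv = 10 ** l
--         right_part = n % tdiv
--         left_part = n // tdiv
--         if l == 0:
--             return False
--         elif left_part * left_part == right_part:
--             return True
--         else:
--             return isPreSN_tail(n, l-1)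
--     return isPreSN_tail(n, l)
-- ===== SOURCE B (Python) =====
-- def isPreSquareNumber(n):
--     # simpler: one ascending while-loop over split divisors, no digit-length pass, no recursion
--     m = abs(n)
--     tdiv = 10
--     while tdiv <= m:
--         left = m // tdiv
--         if left * left == m % tdiv:
--             return True
--         tdiv *= 10
--     return False
-- ===== Notes on version B (the rewrite author's own statement) =====
-- stated objective: simpler
-- what changed: Replaced A's digit-length pre-pass plus descending tail recursion over split exponents by a single ascending while-loop over the divisor itself (tdiv = 10, 100, ...), whose bound tdiv <= m makes the separate length computation unnecessary.
import Mathlib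
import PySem

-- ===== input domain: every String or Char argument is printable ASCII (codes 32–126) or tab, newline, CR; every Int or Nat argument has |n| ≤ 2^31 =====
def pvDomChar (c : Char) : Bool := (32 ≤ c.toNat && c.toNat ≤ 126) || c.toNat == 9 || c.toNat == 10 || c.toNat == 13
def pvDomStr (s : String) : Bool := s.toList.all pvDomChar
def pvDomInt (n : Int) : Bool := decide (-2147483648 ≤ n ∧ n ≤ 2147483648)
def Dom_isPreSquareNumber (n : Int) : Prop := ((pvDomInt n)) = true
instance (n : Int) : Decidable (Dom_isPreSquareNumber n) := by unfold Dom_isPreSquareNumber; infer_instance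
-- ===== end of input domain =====

-- B replaces A's digit-length pre-pass + descending tail recursion by one ascending
-- while-loop over the divisor itself; return value agreement is proved for all n.

-- ===== PORT A =====
-- A's inner while-loop 'getLength' as its structural recursion (same state: num)
def pvGetLength (num : Int) : Int :=
  if h : 10 ≤ num then 1 + pvGetLength (PySem.Int.floordiv num 10) else 1
termination_by num.toNat
decreasing_by
  rw [PySem.Int.floordiv_eq_ediv_of_pos (by omega)]; omega

-- A's tail recursion; l is the exponent, always ≥ 0 in A, so carried as a Nat
def pvTail (n : Int) (l : Nat) : Bool :=
  let tdiv : Int := (10 : Int) ^ l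
  let right := PySem.Int.mod n tdiv
  let left := PySem.Int.floordiv n tdiv
  if h : l = 0 then false
  else if left * left == right then true
  else pvTail n (l - 1)
termination_by l
decreasing_by omega

def isPreSquareNumber (n : Int) : Bool :=
  let m := |n|
  pvTail m (pvGetLength m - 1).toNat

-- ===== PORT B =====
-- B's while-loop; state is the divisor tdiv (m = abs n is a Nat).
-- '1 ≤ tdiv' is a totality guard only: the loop is entered with tdiv = 10 and multiplies by 10.
def pvAltLoop (m tdiv : Nat) : Bool :=
  if h : 1 ≤ tdiv ∧ tdiv ≤ m then
    let left := m / tdiv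
    if left * left = m % tdiv then true
    else pvAltLoop m (tdiv * 10)
  else false
termination_by m + 1 - tdiv
decreasing_by omega

def isPreSquareNumber_alt (n : Int) : Bool :=
  pvAltLoop n.natAbs 10

-- ===== PRECONDITION & SPEC =====
def Spec_isPreSquareNumber (n : Int) (out : Bool) : Prop := out = isPreSquareNumber_alt n
instance (n : Int) (out : Bool) : Decidable (Spec_isPreSquareNumber n out) := by unfold Spec_isPreSquareNumber; infer_instance

-- ===== CLAIM (what is proved, stated in full; the proofs are below) =====
def Claim_equal_isPreSquareNumber : Prop := ∀ (n : Int), Dom_isPreSquareNumber n → Spec_isPreSquareNumber n (isPreSquareNumber n)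

-- ===== LEMMAS AND PROOFS =====

-- the split predicate both programs test, in Nat arithmetic
def pvHit (m k : Nat) : Prop := (m / 10 ^ k) * (m / 10 ^ k) = m % 10 ^ k

-- A's tail recursion returns true iff some split exponent k with 1 ≤ k ≤ l hits
theorem pvTail_iff (m : Nat) (l : Nat) :
    pvTail (m : Int) l = true ↔ ∃ k, 1 ≤ k ∧ k ≤ l ∧ pvHit m k := by
  induction l with
  | zero =>
      rw [pvTail]
      constructor
      · intro h; exact absurd h (by simp)
      · rintro ⟨k, h1, h2, _⟩; omega
  | succ l ih =>
      rw [pvTail]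
      have hcast : ((10 : Int) ^ (l + 1)) = ((10 ^ (l + 1) : Nat) : Int) := by push_cast; ring
      simp only [hcast, PySem.Int.floordiv_natCast, PySem.Int.mod_natCast]
      rw [dif_neg (Nat.succ_ne_zero l)]
      split_ifs with hc
      · have hP : pvHit m (l + 1) := by
          have := beq_iff_eq.mp hc
          unfold pvHit; exact_mod_cast this
        exact iff_of_true rfl ⟨l + 1, by omega, le_refl _, hP⟩
      · have hP : ¬ pvHit m (l + 1) := fun h => hc (beq_iff_eq.mpr (by exact_mod_cast h))
        rw [Nat.add_sub_cancel, ih]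
        constructor
        · rintro ⟨k, h1, h2, h3⟩; exact ⟨k, h1, by omega, h3⟩
        · rintro ⟨k, h1, h2, h3⟩
          rcases Nat.lt_or_ge k (l + 1) with hk | hk
          · exact ⟨k, h1, by omega, h3⟩
          · exact absurd ((by omega : k = l + 1) ▸ h3) hP

-- B's loop starting at divisor 10^i returns true iff some exponent k ≥ i hits within range
theorem pvAltLoop_iff (m : Nat) : ∀ i : Nat,
    pvAltLoop m (10 ^ i) = true ↔ ∃ k, i ≤ k ∧ 10 ^ k ≤ m ∧ pvHit m k := by
  intro i
  by_cases hm : 10 ^ i ≤ m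
  case neg =>
    rw [pvAltLoop]
    rw [dif_neg (fun h => hm h.2)]
    refine iff_of_false (by simp) ?_
    rintro ⟨k, hik, hkm, _⟩
    exact hm (le_trans (Nat.pow_le_pow_right (by omega) hik) hkm)
  case pos =>
    generalize hD : m - 10 ^ i = D
    induction D using Nat.strong_induction_on generalizing i with
    | _ D ihD =>
      rw [pvAltLoop]
      rw [dif_pos ⟨Nat.one_le_pow _ _ (by omega), hm⟩]
      show (if m / 10 ^ i * (m / 10 ^ i) = m % 10 ^ i then true else pvAltLoop m (10 ^ i * 10)) = true
        ↔ ∃ k, i ≤ k ∧ 10 ^ k ≤ m ∧ pvHit m k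
      split_ifs with hc
      · exact iff_of_true rfl ⟨i, le_refl _, hm, hc⟩
      · have hP : ¬ pvHit m i := hc
        have hpow : (10 : Nat) ^ i * 10 = 10 ^ (i + 1) := (pow_succ 10 i).symm
        by_cases hm' : 10 ^ (i + 1) ≤ m
        · have hlt : m - 10 ^ (i + 1) < D := by
            have : 10 ^ i < 10 ^ (i + 1) := Nat.pow_lt_pow_right (by omega) (by omega)
            omega
          rw [hpow, ihD _ hlt (i + 1) hm' rfl]
          constructor
          · rintro ⟨k, h1, h2, h3⟩; exact ⟨k, by omega, h2, h3⟩
          · rintro ⟨k, h1, h2, h3⟩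
            rcases Nat.lt_or_ge k (i + 1) with hk | hk
            · exact absurd ((by omega : k = i) ▸ h3) hP
            · exact ⟨k, hk, h2, h3⟩
        · rw [hpow, pvAltLoop, dif_neg (fun h => hm' h.2)]
          refine iff_of_false (by simp) ?_
          rintro ⟨k, hik, hkm, hkP⟩
          rcases Nat.lt_or_ge k (i + 1) with hk | hk
          · exact hP ((by omega : k = i) ▸ hkP)
          · exact hm' (le_trans (Nat.pow_le_pow_right (by omega) hk) hkm)

-- pvGetLength computes the decimal digit count
theorem pvGetLength_spec (m : Nat) :
    ∃ d : Nat, pvGetLength (m : Int) = (d : Int) ∧ 1 ≤ d ∧ m < 10 ^ d ∧ (d = 1 ∨ 10 ^ (d - 1) ≤ m) := by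
  induction m using Nat.strong_induction_on with
  | _ m ih =>
    rw [pvGetLength]
    by_cases hm : (10 : Int) ≤ (m : Nat)
    · have hm' : 10 ≤ m := by exact_mod_cast hm
      have hdiv : PySem.Int.floordiv (m : Int) 10 = ((m / 10 : Nat) : Int) := by
        exact_mod_cast PySem.Int.floordiv_natCast m 10
      obtain ⟨d, hd, hd1, hdlt, hdge⟩ := ih (m / 10) (by omega)
      rw [dif_pos hm, hdiv, hd]
      refine ⟨d + 1, by push_cast; ring, by omega, ?_, ?_⟩
      · have h1 : m < 10 * (m / 10) + 10 := by omega
        have h2 : 10 * (m / 10) + 10 ≤ 10 * 10 ^ d := by omega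
        have h3 : 10 * 10 ^ d = 10 ^ (d + 1) := by rw [pow_succ, Nat.mul_comm]
        omega
      · right
        simp only [Nat.add_sub_cancel]
        rcases hdge with h1 | h1
        · subst h1; simpa using hm'
        · have h2 : 10 * 10 ^ (d - 1) ≤ 10 * (m / 10) := by omega
          have h3 : 10 * 10 ^ (d - 1) = 10 ^ d := by
            rw [Nat.mul_comm, ← pow_succ, (by omega : d - 1 + 1 = d)]
          omega
    · have hm' : m < 10 := by exact_mod_cast not_le.mp hm
      exact ⟨1, by rw [dif_neg hm]; norm_num, by omega, by omega, Or.inl rfl⟩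

-- ===== VERDICT (by name: the statement is the Claim_ definition above) =====
theorem isPreSquareNumber_spec : Claim_equal_isPreSquareNumber := by
  intro n _
  unfold Spec_isPreSquareNumber isPreSquareNumber isPreSquareNumber_alt
  show pvTail (|n|) ((pvGetLength (|n|) - 1).toNat) = pvAltLoop n.natAbs 10
  set m : Nat := n.natAbs with hm
  have habs : |n| = (m : Int) := Int.abs_eq_natAbs n
  rw [habs]
  obtain ⟨d, hd, hd1, hdlt, hdge⟩ := pvGetLength_spec m
  have hL : (pvGetLength (m : Int) - 1).toNat = d - 1 := by rw [hd]; omega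
  rw [hL]
  have h10 : (10 : Nat) = 10 ^ 1 := by norm_num
  rw [Bool.eq_iff_iff, pvTail_iff, h10, pvAltLoop_iff]
  constructor
  · rintro ⟨k, h1, h2, h3⟩
    refine ⟨k, h1, ?_, h3⟩
    rcases hdge with hdo | hdo
    · omega
    · exact le_trans (Nat.pow_le_pow_right (by omega) (by omega)) hdo
  · rintro ⟨k, h1, h2, h3⟩
    refine ⟨k, h1, ?_, h3⟩
    have h4 : 10 ^ k < 10 ^ d := lt_of_le_of_lt h2 hdlt
    have := (Nat.pow_lt_pow_iff_right (by omega : 1 < 10)).mp h4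
    omega
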